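-- pv_equiv track=rewrite | github.com/TheWorldAvatar/mcp-tool-layer | src/agents/mops/misc/extraction_agent_result_test.py | _species_alias_match_count
-- ===== SOURCE A (Python) =====
-- from typing import Dict, List, Optional, Tuple, Set
--
-- def _species_alias_match_count(pred_list: List[Set[str]], gold_list: List[Set[str]]) -> Tuple[int, int, int]:
--     matched_g = [False] * len(gold_list)
--     tp = 0
--     for p in pred_list:
--         found = False
--         for i, g in enumerate(gold_list):
--             if not matched_g[i] and (p & g):
--                 matched_g[i] = True
--                 tp += 1
--                 found = True
--                 break
--         # unmatched preds counted later as FP; unmatched golds as FN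
--     fp = len(pred_list) - tp
--     fn = len(gold_list) - tp
--     return tp, fp, fn
-- ===== SOURCE B (Python) =====
-- def _species_alias_match_count(pred_list, gold_list):
--     # Inverted index: element -> ascending list of gold indices containing it.
--     elem2golds = {}
--     for i, g in enumerate(gold_list):
--         for x in g:
--             elem2golds.setdefault(x, []).append(i)
--     matched = set()
--     tp = 0
--     for p in pred_list:
--         best = None
--         for x in p:
--             for i in elem2golds.get(x, []):
--                 if i not in matched:
--                     if best is None or i < best:
--                         best = i
--                     break  # list is ascending: first unmatched index is its minimum
--         if best is not None:
--             matched.add(best)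
--             tp += 1
--     return tp, len(pred_list) - tp, len(gold_list) - tp
-- ===== Notes on version B (the rewrite author's own statement) =====
-- stated objective: alternative
-- what changed: Instead of rescanning every gold set per prediction, B builds an inverted index from element to ascending gold indices once and, for each prediction, takes the minimal still-unmatched candidate gold index drawn from the index; same greedy matching result.
import Mathlib
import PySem

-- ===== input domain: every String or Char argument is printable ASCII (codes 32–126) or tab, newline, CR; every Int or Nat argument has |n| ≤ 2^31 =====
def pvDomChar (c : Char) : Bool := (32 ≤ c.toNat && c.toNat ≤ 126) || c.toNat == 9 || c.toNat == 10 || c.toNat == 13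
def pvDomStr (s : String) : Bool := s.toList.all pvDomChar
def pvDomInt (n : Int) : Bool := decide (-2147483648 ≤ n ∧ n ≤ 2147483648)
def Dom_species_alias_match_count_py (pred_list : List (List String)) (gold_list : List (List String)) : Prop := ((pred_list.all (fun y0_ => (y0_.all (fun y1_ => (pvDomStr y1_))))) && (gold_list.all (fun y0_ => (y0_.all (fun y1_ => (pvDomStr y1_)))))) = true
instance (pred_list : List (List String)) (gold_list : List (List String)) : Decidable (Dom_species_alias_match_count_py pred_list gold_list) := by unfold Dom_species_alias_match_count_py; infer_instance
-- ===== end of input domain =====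

-- B replaces A's per-pred scan over all golds with an inverted index (element → ascending
-- gold indices) and picks the minimal still-unmatched candidate index; same greedy result.

-- ===== PORT A =====
def pvInterA (p g : List String) : Bool := !(PySem.Set.inter p g).isEmpty

-- the inner 'for i, g in enumerate(gold_list)' loop with break, recursing on golds and mask together
def pvInnerA (p : List String) : List (List String) → List Bool → (List Bool × Int)
  | [], m => (m, 0)
  | _ :: _, [] => ([], 0)
  | g :: gs, b :: bs =>
    if !b && pvInterA p g then (true :: bs, 1)
    else
      let r := pvInnerA p gs bs
      (b :: r.1, r.2)

def species_alias_match_count_py (pred_list : List (List String)) (gold_list : List (List String)) : List Int :=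
  let st := pred_list.foldl
    (fun (st : List Bool × Int) p =>
      let r := pvInnerA p gold_list st.1
      (r.1, st.2 + r.2))
    (List.replicate gold_list.length false, 0)
  [st.2, (pred_list.length : Int) - st.2, (gold_list.length : Int) - st.2]

-- ===== PORT B =====
-- 'for i, g in enumerate(gold_list): for x in g: elem2golds.setdefault(x, []).append(i)'
def pvBuildIdx : List (List String) → Nat → PySem.Dict String (List Nat) → PySem.Dict String (List Nat)
  | [], _, d => d
  | g :: gs, i, d =>
      pvBuildIdx gs (i + 1) (g.foldl (fun d x => d.insert x (d.getD x [] ++ [i])) d)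

-- inner 'for i in elem2golds.get(x, []): if i not in matched: …; break'
def pvFirstUn (matched : PySem.Set Nat) : List Nat → Option Nat
  | [] => none
  | i :: is => if PySem.Set.contains matched i then pvFirstUn matched is else some i

-- 'for x in p: …' accumulating best (min over order-independent candidates)
def pvBest (idx : PySem.Dict String (List Nat)) (matched : PySem.Set Nat) (p : List String) : Option Nat :=
  p.foldl
    (fun best x =>
      match pvFirstUn matched (idx.getD x []) with
      | none => best
      | some i =>
        match best with
        | none => some i
        | some b => if i < b then some i else some b)
    none

def species_alias_match_count_py_alt (pred_list : List (List String)) (gold_list : List (List String)) : List Int :=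
  let idx := pvBuildIdx gold_list 0 PySem.Dict.empty
  let st := pred_list.foldl
    (fun (st : PySem.Set Nat × Int) p =>
      match pvBest idx st.1 p with
      | none => st
      | some i => (PySem.Set.add st.1 i, st.2 + 1))
    (PySem.Set.empty, 0)
  [st.2, (pred_list.length : Int) - st.2, (gold_list.length : Int) - st.2]

-- ===== PRECONDITION & SPEC =====
def Spec_species_alias_match_count_py (pred_list : List (List String)) (gold_list : List (List String)) (out : List Int) : Prop := out = species_alias_match_count_py_alt pred_list gold_list
instance (pred_list : List (List String)) (gold_list : List (List String)) (out : List Int) : Decidable (Spec_species_alias_match_count_py pred_list gold_list out) := by unfold Spec_species_alias_match_count_py; infer_instance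

-- ===== CLAIM (what is proved, stated in full; the proofs are below) =====
def Claim_equal_species_alias_match_count_py : Prop := ∀ (pred_list : List (List String)) (gold_list : List (List String)), Dom_species_alias_match_count_py pred_list gold_list → Spec_species_alias_match_count_py pred_list gold_list (species_alias_match_count_py pred_list gold_list)

-- ===== LEMMAS AND PROOFS =====

/-- `o` is the least element satisfying `P` (none = no element). -/
def pvOptLeast (P : Nat → Prop) : Option Nat → Prop
  | none => ∀ j, ¬ P j
  | some j => P j ∧ ∀ k, P k → j ≤ k

theorem pvOptLeast_congr {P Q : Nat → Prop} {o : Option Nat}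
    (h : pvOptLeast P o) (hpq : ∀ j, P j ↔ Q j) : pvOptLeast Q o := by
  cases o with
  | none => intro j hq; exact h j ((hpq j).mpr hq)
  | some j => exact ⟨(hpq j).mp h.1, fun k hk => h.2 k ((hpq k).mpr hk)⟩

theorem pvOptLeast_unique {P : Nat → Prop} {o o' : Option Nat}
    (h : pvOptLeast P o) (h' : pvOptLeast P o') : o = o' := by
  cases o with
  | none =>
    cases o' with
    | none => rfl
    | some j => exact absurd h'.1 (h j)
  | some j =>
    cases o' with
    | none => exact absurd h.1 (h' j)
    | some j' => exact congrArg some (Nat.le_antisymm (h.2 j' h'.1) (h'.2 j h.1))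

theorem pvInterA_iff (p g : List String) : pvInterA p g = true ↔ ∃ x ∈ p, x ∈ g := by
  constructor
  · intro h
    have hne : PySem.Set.inter p g ≠ [] := by
      intro he; simp [pvInterA, he] at h
    obtain ⟨y, hy⟩ := List.exists_mem_of_ne_nil _ hne
    have hm := (PySem.Set.mem_inter p g y).mp hy
    exact ⟨y, hm.1, hm.2⟩
  · rintro ⟨x, hxp, hxg⟩
    have : x ∈ PySem.Set.inter p g := (PySem.Set.mem_inter p g x).mpr ⟨hxp, hxg⟩
    have hne : PySem.Set.inter p g ≠ [] := List.ne_nil_of_mem this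
    simp [pvInterA, hne]

/-- the predicate A's inner scan searches for at index j -/
def pvSA (p : List String) (gs : List (List String)) (bs : List Bool) (j : Nat) : Prop :=
  bs.getD j true = false ∧ pvInterA p (gs.getD j []) = true

/-- position of the first hit of A's inner scan -/
def pvF (p : List String) : List (List String) → List Bool → Option Nat
  | g :: gs, b :: bs =>
    if !b && pvInterA p g then some 0 else (pvF p gs bs).map (· + 1)
  | _, _ => none

theorem pvF_least (p : List String) :
    ∀ (gs : List (List String)) (bs : List Bool), pvOptLeast (pvSA p gs bs) (pvF p gs bs) := by
  intro gs
  induction gs with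
  | nil =>
    intro bs j hj
    have := hj.2
    simp only [List.getD_nil] at this
    obtain ⟨x, _, hx⟩ := (pvInterA_iff p []).mp this
    exact absurd hx (List.not_mem_nil)
  | cons g gs ih =>
    intro bs
    cases bs with
    | nil =>
      intro j hj
      have := hj.1
      simp at this
    | cons b bs =>
      show pvOptLeast _ (if !b && pvInterA p g then some 0 else (pvF p gs bs).map (· + 1))
      split
      · next h =>
        simp only [Bool.and_eq_true, Bool.not_eq_true'] at h
        exact ⟨⟨by simp [h.1], by simpa [pvSA] using h.2⟩, fun k _ => Nat.zero_le k⟩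
      · next h =>
        simp only [Bool.and_eq_true, Bool.not_eq_true'] at h
        have hIH := ih bs
        have hz : ¬ pvSA p (g :: gs) (b :: bs) 0 := by
          intro hz
          exact h ⟨by simpa [pvSA] using hz.1, by simpa [pvSA] using hz.2⟩
        have hsucc : ∀ k, pvSA p (g :: gs) (b :: bs) (k + 1) ↔ pvSA p gs bs k := by
          intro k; simp [pvSA]
        cases hF : pvF p gs bs with
        | none =>
          simp only [Option.map_none]
          intro j hj
          cases j with
          | zero => exact hz hj
          | succ k =>
            rw [hF] at hIH
            exact hIH k ((hsucc k).mp hj)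
        | some m =>
          simp only [Option.map_some]
          rw [hF] at hIH
          refine ⟨(hsucc m).mpr hIH.1, ?_⟩
          intro k hk
          cases k with
          | zero => exact absurd hk hz
          | succ k' => exact Nat.succ_le_succ (hIH.2 k' ((hsucc k').mp hk))

theorem pvInnerA_eq (p : List String) :
    ∀ (gs : List (List String)) (bs : List Bool),
      pvInnerA p gs bs =
        match pvF p gs bs with
        | none => (bs, 0)
        | some j => (bs.set j true, 1) := by
  intro gs
  induction gs with
  | nil => intro bs; rfl
  | cons g gs ih =>
    intro bs
    cases bs with
    | nil => rfl
    | cons b bs =>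
      simp only [pvInnerA, pvF]
      by_cases hc : (!b && pvInterA p g) = true
      · simp [hc]
      · simp only [hc, if_false, Bool.false_eq_true]
        rw [ih bs]
        cases hF : pvF p gs bs with
        | none => simp
        | some j => simp

/-- occurrence lists of the inverted index -/
def pvOccs (x : String) : List (List String) → Nat → List Nat
  | [], _ => []
  | g :: gs, i => List.replicate (g.count x) i ++ pvOccs x gs (i + 1)

theorem pvGetD_fold_one (x : String) (i : Nat) :
    ∀ (g : List String) (d : PySem.Dict String (List Nat)),
      ((g.foldl (fun d y => d.insert y (d.getD y [] ++ [i])) d).getD x []) =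
        d.getD x [] ++ List.replicate (g.count x) i := by
  intro g
  induction g with
  | nil => intro d; simp
  | cons y g ih =>
    intro d
    simp only [List.foldl_cons]
    rw [ih, PySem.Dict.getD_insert, List.count_cons]
    by_cases hxy : x = y
    · subst hxy
      simp [List.append_assoc, List.replicate_succ]
    · have hyx : (y == x) = false := by
        rw [beq_eq_false_iff_ne]; exact fun h => hxy h.symm
      simp [hxy, hyx]

theorem pvGetD_build (x : String) :
    ∀ (gs : List (List String)) (i : Nat) (d : PySem.Dict String (List Nat)),
      (pvBuildIdx gs i d).getD x [] = d.getD x [] ++ pvOccs x gs i := by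
  intro gs
  induction gs with
  | nil => intro i d; simp [pvBuildIdx, pvOccs]
  | cons g gs ih =>
    intro i d
    show (pvBuildIdx gs (i + 1) _).getD x [] = _
    rw [ih, pvGetD_fold_one]
    simp [pvOccs, List.append_assoc]

theorem pvMem_occs (x : String) :
    ∀ (gs : List (List String)) (i j : Nat),
      j ∈ pvOccs x gs i ↔ ∃ k, k < gs.length ∧ j = i + k ∧ x ∈ gs.getD k [] := by
  intro gs
  induction gs with
  | nil => intro i j; simp [pvOccs]
  | cons g gs ih =>
    intro i j
    simp only [pvOccs, List.mem_append, List.mem_replicate, ih]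
    constructor
    · rintro (⟨hc, rfl⟩ | ⟨k, hk, rfl, hx⟩)
      · exact ⟨0, by simp, by simp, by
          have := List.count_pos_iff.mp (Nat.pos_of_ne_zero hc)
          simpa using this⟩
      · exact ⟨k + 1, by simpa using hk, by omega, by simpa using hx⟩
    · rintro ⟨k, hk, rfl, hx⟩
      cases k with
      | zero =>
        left
        refine ⟨?_, by simp⟩
        have : 0 < g.count x := List.count_pos_iff.mpr (by simpa using hx)
        omega
      | succ k' =>
        right
        exact ⟨k', by simpa using hk, by omega, by simpa using hx⟩

theorem pvOccs_lb (x : String) (gs : List (List String)) (i : Nat) :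
    ∀ j ∈ pvOccs x gs i, i ≤ j := by
  intro j hj
  obtain ⟨k, _, rfl, _⟩ := (pvMem_occs x gs i j).mp hj
  omega

theorem pvOccs_sorted (x : String) :
    ∀ (gs : List (List String)) (i : Nat), (pvOccs x gs i).Pairwise (· ≤ ·) := by
  intro gs
  induction gs with
  | nil => intro i; simp [pvOccs]
  | cons g gs ih =>
    intro i
    simp only [pvOccs]
    rw [List.pairwise_append]
    refine ⟨?_, ih (i + 1), ?_⟩
    · exact List.pairwise_replicate.mpr (Or.inr (Nat.le_refl i))
    · intro a ha b hb
      have := (List.mem_replicate.mp ha).2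
      have := pvOccs_lb x gs (i + 1) b hb
      omega

theorem pvFirstUn_least (matched : PySem.Set Nat) :
    ∀ (l : List Nat), l.Pairwise (· ≤ ·) →
      pvOptLeast (fun j => j ∈ l ∧ PySem.Set.contains matched j = false) (pvFirstUn matched l) := by
  intro l
  induction l with
  | nil => intro _ j hj; exact absurd hj.1 (List.not_mem_nil)
  | cons i is ih =>
    intro hp
    rw [List.pairwise_cons] at hp
    show pvOptLeast _ (if PySem.Set.contains matched i then pvFirstUn matched is else some i)
    split
    · next h =>
      refine pvOptLeast_congr (ih hp.2) ?_
      intro j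
      constructor
      · rintro ⟨hj, hm⟩; exact ⟨List.mem_cons_of_mem _ hj, hm⟩
      · rintro ⟨hj, hm⟩
        rcases List.mem_cons.mp hj with rfl | hj
        · rw [h] at hm; cases hm
        · exact ⟨hj, hm⟩
    · next h =>
      refine ⟨⟨List.mem_cons_self, by simpa using h⟩, ?_⟩
      rintro k ⟨hk, _⟩
      rcases List.mem_cons.mp hk with rfl | hk
      · exact Nat.le_refl k
      · exact hp.1 k hk

/-- combining the running best with one candidate, as Source B's inner update does -/
def pvCombine (o oq : Option Nat) : Option Nat :=
  match oq with
  | none => o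
  | some i =>
    match o with
    | none => some i
    | some b => if i < b then some i else some b

theorem pvCombine_least {P Q : Nat → Prop} {o oq : Option Nat}
    (hP : pvOptLeast P o) (hQ : pvOptLeast Q oq) :
    pvOptLeast (fun j => P j ∨ Q j) (pvCombine o oq) := by
  cases oq with
  | none =>
    refine pvOptLeast_congr hP ?_
    intro j
    constructor
    · exact Or.inl
    · rintro (h | h)
      · exact h
      · exact absurd h (hQ j)
  | some i =>
    cases o with
    | none =>
      refine ⟨Or.inr hQ.1, ?_⟩
      rintro k (hk | hk)
      · exact absurd hk (hP k)
      · exact hQ.2 k hk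
    | some b =>
      by_cases hib : i < b
      · show pvOptLeast _ (if i < b then some i else some b)
        rw [if_pos hib]
        refine ⟨Or.inr hQ.1, ?_⟩
        rintro k (hk | hk)
        · exact le_trans (Nat.le_of_lt hib) (hP.2 k hk)
        · exact hQ.2 k hk
      · show pvOptLeast _ (if i < b then some i else some b)
        rw [if_neg hib]
        refine ⟨Or.inl hP.1, ?_⟩
        rintro k (hk | hk)
        · exact hP.2 k hk
        · exact le_trans (Nat.le_of_not_lt hib) (hQ.2 k hk)

theorem pvBest_fold (occf : String → List Nat) (matched : PySem.Set Nat)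
    (hocc : ∀ x, (occf x).Pairwise (· ≤ ·)) :
    ∀ (p : List String) (o : Option Nat) (P : Nat → Prop), pvOptLeast P o →
      pvOptLeast (fun j => P j ∨ ∃ x ∈ p, j ∈ occf x ∧ PySem.Set.contains matched j = false)
        (p.foldl
          (fun best x =>
            match pvFirstUn matched (occf x) with
            | none => best
            | some i =>
              match best with
              | none => some i
              | some b => if i < b then some i else some b)
          o) := by
  intro p
  induction p with
  | nil =>
    intro o P hP
    refine pvOptLeast_congr hP ?_
    intro j; simp
  | cons x p ih =>
    intro o P hP
    simp only [List.foldl_cons]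
    have hQ := pvFirstUn_least matched (occf x) (hocc x)
    have hstep := pvCombine_least hP hQ
    have hmain := ih (pvCombine o (pvFirstUn matched (occf x))) _ hstep
    refine pvOptLeast_congr hmain ?_
    intro j
    constructor
    · rintro ((h | h) | ⟨y, hy, h⟩)
      · exact Or.inl h
      · exact Or.inr ⟨x, List.mem_cons_self, h⟩
      · exact Or.inr ⟨y, List.mem_cons_of_mem _ hy, h⟩
    · rintro (h | ⟨y, hy, h⟩)
      · exact Or.inl (Or.inl h)
      · rcases List.mem_cons.mp hy with rfl | hy
        · exact Or.inl (Or.inr h)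
        · exact Or.inr ⟨y, hy, h⟩

theorem pvBest_least (gold : List (List String)) (matched : PySem.Set Nat) (p : List String) :
    pvOptLeast
      (fun j => ∃ x ∈ p, j ∈ pvOccs x gold 0 ∧ PySem.Set.contains matched j = false)
      (pvBest (pvBuildIdx gold 0 PySem.Dict.empty) matched p) := by
  have hempty : ∀ x : String, (PySem.Dict.empty : PySem.Dict String (List Nat)).getD x [] = [] :=
    fun _ => rfl
  have h2 : ∀ x : String, (pvBuildIdx gold 0 PySem.Dict.empty).getD x [] = pvOccs x gold 0 := by
    intro x; rw [pvGetD_build, hempty, List.nil_append]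
  have hocc : ∀ x : String, ((pvBuildIdx gold 0 PySem.Dict.empty).getD x []).Pairwise (· ≤ ·) := by
    intro x
    rw [h2]
    exact pvOccs_sorted x gold 0
  have h := pvBest_fold (fun x => (pvBuildIdx gold 0 PySem.Dict.empty).getD x []) matched hocc p
    none (fun _ => False) (fun j hj => hj)
  refine pvOptLeast_congr h ?_
  intro j
  simp only [h2, false_or]

/-- the invariant tying A's boolean mask to B's matched set -/
def pvInv (n : Nat) (bs : List Bool) (matched : PySem.Set Nat) : Prop :=
  bs.length = n ∧
  ∀ j, (bs.getD j true = false ↔ (j < n ∧ PySem.Set.contains matched j = false))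

theorem pvSA_iff_SB (p : List String) (gold : List (List String)) (bs : List Bool)
    (matched : PySem.Set Nat) (hInv : pvInv gold.length bs matched) :
    ∀ j, pvSA p gold bs j ↔
      ∃ x ∈ p, j ∈ pvOccs x gold 0 ∧ PySem.Set.contains matched j = false := by
  intro j
  constructor
  · rintro ⟨hb, hint⟩
    obtain ⟨hjn, hjm⟩ := (hInv.2 j).mp hb
    obtain ⟨x, hxp, hxg⟩ := (pvInterA_iff _ _).mp hint
    refine ⟨x, hxp, ?_, hjm⟩
    exact (pvMem_occs x gold 0 j).mpr ⟨j, hjn, by omega, hxg⟩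
  · rintro ⟨x, hxp, hocc, hjm⟩
    obtain ⟨k, hk, hjk, hxg⟩ := (pvMem_occs x gold 0 j).mp hocc
    have hkj : k = j := by omega
    rw [hkj] at hk hxg
    exact ⟨(hInv.2 j).mpr ⟨hk, hjm⟩, (pvInterA_iff _ _).mpr ⟨x, hxp, hxg⟩⟩

theorem pvInv_init (n : Nat) : pvInv n (List.replicate n false) [] := by
  refine ⟨List.length_replicate, ?_⟩
  intro j
  by_cases hj : j < n
  · have hget : (List.replicate n false).getD j true = false := by
      rw [List.getD_eq_getElem _ _ (by simpa using hj)]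
      simp
    rw [hget]
    simp [hj, PySem.Set.contains]
  · have hget : (List.replicate n false).getD j true = true := by
      rw [List.getD_eq_default]
      simpa using Nat.le_of_not_lt hj
    rw [hget]
    simp [hj]

theorem pvInv_step (n : Nat) (bs : List Bool) (matched : PySem.Set Nat) (j : Nat)
    (hInv : pvInv n bs matched) (hjn : j < n) (hjm : PySem.Set.contains matched j = false) :
    pvInv n (bs.set j true) (PySem.Set.add matched j) := by
  have hlen : (bs.set j true).length = n := by simp [hInv.1]
  have hadd : PySem.Set.add matched j = matched ++ [j] := by
    apply PySem.Set.add_of_not_mem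
    intro hmem
    simp [PySem.Set.contains] at hjm
    exact hjm hmem
  refine ⟨hlen, ?_⟩
  intro k
  by_cases hkj : k = j
  · subst hkj
    have hk : k < bs.length := by rw [hInv.1]; exact hjn
    have hset : (bs.set k true).getD k true = true := by
      simp [List.getD, List.getElem?_set_self hk]
    rw [hset, hadd]
    simp [PySem.Set.contains]
  · have hset : (bs.set j true).getD k true = bs.getD k true := by
      simp [List.getD, List.getElem?_set_ne (fun h => hkj h.symm)]
    have hc : (PySem.Set.contains (matched ++ [j]) k = false) ↔
        (PySem.Set.contains matched k = false) := by
      simp [PySem.Set.contains, hkj]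
    rw [hset, hadd]
    rw [show (k < n ∧ PySem.Set.contains (matched ++ [j]) k = false) ↔
        (k < n ∧ PySem.Set.contains matched k = false) from and_congr_right fun _ => hc]
    exact hInv.2 k

theorem pvOuter (gold : List (List String)) :
    ∀ (preds : List (List String)) (bs : List Bool) (matched : PySem.Set Nat) (tp : Int),
      pvInv gold.length bs matched →
      (preds.foldl
        (fun (st : List Bool × Int) p =>
          let r := pvInnerA p gold st.1
          (r.1, st.2 + r.2)) (bs, tp)).2 =
      (preds.foldl
        (fun (st : PySem.Set Nat × Int) p =>
          match pvBest (pvBuildIdx gold 0 PySem.Dict.empty) st.1 p with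
          | none => st
          | some i => (PySem.Set.add st.1 i, st.2 + 1)) (matched, tp)).2 := by
  intro preds
  induction preds with
  | nil => intro bs matched tp _; rfl
  | cons p preds ih =>
    intro bs matched tp hInv
    have hA := pvF_least p gold bs
    have hB := pvBest_least gold matched p
    have hsame : pvF p gold bs = pvBest (pvBuildIdx gold 0 PySem.Dict.empty) matched p :=
      pvOptLeast_unique (pvOptLeast_congr hA (pvSA_iff_SB p gold bs matched hInv)) hB
    simp only [List.foldl_cons]
    rw [pvInnerA_eq]
    cases hF : pvF p gold bs with
    | none =>
      rw [hF] at hsame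
      rw [← hsame]
      simp only []
      have : tp + 0 = tp := by ring
      rw [this]
      exact ih bs matched tp hInv
    | some j =>
      rw [hF] at hsame hA
      rw [← hsame]
      simp only []
      obtain ⟨hjn, hjm⟩ := (hInv.2 j).mp hA.1.1
      exact ih _ _ _ (pvInv_step gold.length bs matched j hInv hjn hjm)

-- ===== VERDICT (by name: the statement is the Claim_ definition above) =====
theorem species_alias_match_count_py_spec : Claim_equal_species_alias_match_count_py := by
  intro pred_list gold_list _
  unfold Spec_species_alias_match_count_py
  unfold species_alias_match_count_py species_alias_match_count_py_alt
  have h := pvOuter gold_list pred_list (List.replicate gold_list.length false)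
    PySem.Set.empty 0 (pvInv_init gold_list.length)
  simp only [PySem.Set.empty] at h ⊢
  rw [h]
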